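-- pv_equiv track=rewrite | github.com/tradingstrategy-ai/trade-executor | tradeexecutor/analysis/grid_search_format.py | get_group_colour_palette
-- ===== SOURCE A (Python) =====
-- def get_group_colour_palette(num_groups: int) -> list[tuple[int, int, int]]:
--     """Return distinct RGB tuples for grouped grid-search charts."""
--     base_colours = [
--         (31, 119, 180),
--         (214, 39, 40),
--         (44, 160, 44),
--         (255, 127, 14),
--         (148, 103, 189),
--         (23, 190, 207),
--         (188, 189, 34),
--         (227, 119, 194),
--     ]
--     return [base_colours[i % len(base_colours)] for i in range(num_groups)]
-- ===== SOURCE B (Python) =====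
-- def get_group_colour_palette(num_groups: int) -> list[tuple[int, int, int]]:
--     """Return distinct RGB tuples for grouped grid-search charts."""
--     base_colours = [
--         (31, 119, 180),
--         (214, 39, 40),
--         (44, 160, 44),
--         (255, 127, 14),
--         (148, 103, 189),
--         (23, 190, 207),
--         (188, 189, 34),
--         (227, 119, 194),
--     ]
--     reps = num_groups // len(base_colours) + 1
--     return (base_colours * reps)[:num_groups]
-- ===== Notes on version B (the rewrite author's own statement) =====
-- stated objective: alternative
-- what changed: Replaces the per-index comprehension with i % 8 lookup by building the whole repeated palette via list multiplication (num_groups // 8 + 1 copies) and truncating it with a slice.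
import Mathlib
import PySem

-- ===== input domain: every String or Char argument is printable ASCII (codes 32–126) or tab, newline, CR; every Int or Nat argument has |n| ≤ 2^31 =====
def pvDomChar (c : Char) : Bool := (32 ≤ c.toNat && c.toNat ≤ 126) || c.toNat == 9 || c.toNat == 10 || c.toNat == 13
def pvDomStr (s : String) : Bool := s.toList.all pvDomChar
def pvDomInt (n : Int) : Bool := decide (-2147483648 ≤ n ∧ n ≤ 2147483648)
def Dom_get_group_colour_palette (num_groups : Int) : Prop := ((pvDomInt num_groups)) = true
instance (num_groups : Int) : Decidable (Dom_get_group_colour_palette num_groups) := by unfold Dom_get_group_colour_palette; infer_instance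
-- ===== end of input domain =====

-- B builds the palette by repeating the whole base list ⌊n/8⌋+1 times and truncating,
-- instead of A's per-index comprehension with i % 8 (objective: alternative decomposition, no speed claim).

-- ===== PORT A =====
-- the shared colour table literal (identical in Source A and Source B)
def pvBaseColours : List (Int × Int × Int) :=
  [(31, 119, 180), (214, 39, 40), (44, 160, 44), (255, 127, 14),
   (148, 103, 189), (23, 190, 207), (188, 189, 34), (227, 119, 194)]

def get_group_colour_palette (num_groups : Int) : List (Int × Int × Int) :=
  (PySem.List.pyRange 0 num_groups 1).map
    (fun i => PySem.List.pyGetD pvBaseColours (PySem.Int.mod i 8) (0, 0, 0))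

-- ===== PORT B =====
def get_group_colour_palette_alt (num_groups : Int) : List (Int × Int × Int) :=
  let reps : Int := PySem.Int.floordiv num_groups 8 + 1
  PySem.List.slice (List.flatten (List.replicate reps.toNat pvBaseColours)) none (some num_groups)

-- ===== PRECONDITION & SPEC =====
def Spec_get_group_colour_palette (num_groups : Int) (out : List (Int × Int × Int)) : Prop := out = get_group_colour_palette_alt num_groups
instance (num_groups : Int) (out : List (Int × Int × Int)) : Decidable (Spec_get_group_colour_palette num_groups out) := by unfold Spec_get_group_colour_palette; infer_instance

-- ===== CLAIM (what is proved, stated in full; the proofs are below) =====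
def Claim_equal_get_group_colour_palette : Prop := ∀ (num_groups : Int), Dom_get_group_colour_palette num_groups → Spec_get_group_colour_palette num_groups (get_group_colour_palette num_groups)

-- ===== LEMMAS AND PROOFS =====

-- cyclic reading of the flattened replication
theorem pv_flatten_replicate (r : Nat) :
    List.flatten (List.replicate r pvBaseColours)
      = (List.range (8 * r)).map (fun k => pvBaseColours.getD (k % 8) (0, 0, 0)) := by
  induction r with
  | zero => simp
  | succ r ih =>
    rw [List.replicate_succ, List.flatten_cons, ih]
    have h8 : 8 * (r + 1) = 8 + 8 * r := by ring
    rw [h8, List.range_add, List.map_append, List.map_map]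
    have h1 : (List.range 8).map (fun k => pvBaseColours.getD (k % 8) ((0:Int), (0:Int), (0:Int))) = pvBaseColours := by decide
    have h2 : (List.range (8 * r)).map ((fun k => pvBaseColours.getD (k % 8) ((0:Int), (0:Int), (0:Int))) ∘ fun x => 8 + x)
        = (List.range (8 * r)).map (fun k => pvBaseColours.getD (k % 8) ((0:Int), (0:Int), (0:Int))) := by
      apply List.map_congr_left
      intro k _
      simp [Function.comp, Nat.add_comm 8 k, Nat.add_mod_right]
    rw [h1, h2]

-- A's comprehension as a Nat-range map
theorem pv_A_eq (n : Int) (hn : 0 ≤ n) :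
    get_group_colour_palette n
      = (List.range n.toNat).map (fun k => pvBaseColours.getD (k % 8) (0, 0, 0)) := by
  unfold get_group_colour_palette
  have : n = ((n.toNat : Nat) : Int) := by omega
  rw [this, PySem.List.pyRange_zero_natCast, List.map_map]
  apply List.map_congr_left
  intro k _
  have hm : PySem.Int.mod ((k : Nat) : Int) (8 : Int) = (((k % 8 : Nat)) : Int) := by
    exact_mod_cast PySem.Int.mod_natCast k 8
  simp only [Function.comp]
  rw [hm, PySem.List.pyGetD_natCast]

theorem pv_alt_eq (n : Int) :
    get_group_colour_palette_alt n
      = PySem.List.slice (List.flatten (List.replicate (PySem.Int.floordiv n 8 + 1).toNat pvBaseColours)) none (some n) := rfl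

theorem get_group_colour_palette_spec_aux (n : Int) :
    get_group_colour_palette n = get_group_colour_palette_alt n := by
  rw [pv_alt_eq]
  by_cases hn : 0 ≤ n
  · rw [pv_A_eq n hn, PySem.List.slice_to _ hn, pv_flatten_replicate, ← List.map_take]
    congr 1
    -- n.toNat ≤ 8 * (floordiv n 8 + 1).toNat, so the truncation keeps exactly range n.toNat
    have hb : (0 : Int) < 8 := by norm_num
    have h1 := PySem.Int.floordiv_mul_add_mod n 8
    have h2 := PySem.Int.mod_nonneg n hb
    have h3 := PySem.Int.mod_lt n hb
    have h4 : 0 ≤ PySem.Int.floordiv n 8 := by nlinarith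
    have hle : n.toNat ≤ 8 * (PySem.Int.floordiv n 8 + 1).toNat := by omega
    rw [List.take_range, Nat.min_eq_left hle]
  · have hnil : PySem.List.pyRange 0 n 1 = [] :=
      PySem.List.pyRange_one_eq_nil (by omega)
    have hreps : (PySem.Int.floordiv n 8 + 1).toNat = 0 := by
      have hb : (0 : Int) < 8 := by norm_num
      have h1 := PySem.Int.floordiv_mul_add_mod n 8
      have h2 := PySem.Int.mod_nonneg n hb
      have h3 := PySem.Int.mod_lt n hb
      have h4 : PySem.Int.floordiv n 8 < 0 := by nlinarith
      omega
    rw [hreps]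
    simp [get_group_colour_palette, hnil, PySem.List.slice]

-- ===== VERDICT (by name: the statement is the Claim_ definition above) =====
theorem get_group_colour_palette_spec : Claim_equal_get_group_colour_palette := by
  intro n _
  exact get_group_colour_palette_spec_aux n
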